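-- pv_equiv track=rewrite | github.com/pos911/report_stock_daily | src/services/supabase_stockdata_reader.py | _pick_supply_rows
-- ===== SOURCE A (Python) =====
-- from collections import defaultdict
--
-- def _pick_supply_rows(symbols: list[str], price_map: dict, supply_rows: list[dict]) -> dict:
--     rows_by_symbol = defaultdict(list)
--     for row in supply_rows or []:
--         symbol = row.get("symbol")
--         if symbol:
--             rows_by_symbol[symbol].append(row)
--
--     selected = {}
--     for symbol in symbols:
--         rows = rows_by_symbol.get(symbol, [])
--         if not rows:
--             selected[symbol] = {}
--             continue
--         price_date = (price_map.get(symbol) or {}).get("base_date")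
--         exact_date_row = None
--         for row in rows:
--             if price_date and row.get("base_date") == price_date:
--                 exact_date_row = row
--                 break
--         selected[symbol] = exact_date_row or rows[0]
--     return selected
-- ===== SOURCE B (Python) =====
-- def _pick_supply_rows(symbols: list[str], price_map: dict, supply_rows: list[dict]) -> dict:
--     # One pass over supply_rows maintaining two lookup tables; no per-symbol inner scan.
--     first_by_symbol = {}
--     exact_by_symbol = {}
--     for row in supply_rows or []:
--         symbol = row.get("symbol")
--         if not symbol:
--             continue
--         if symbol not in first_by_symbol:
--             first_by_symbol[symbol] = row
--         if symbol not in exact_by_symbol: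
--             price_date = (price_map.get(symbol) or {}).get("base_date")
--             if price_date and row.get("base_date") == price_date:
--                 exact_by_symbol[symbol] = row
--     selected = {}
--     for symbol in symbols:
--         selected[symbol] = exact_by_symbol.get(symbol) or first_by_symbol.get(symbol) or {}
--     return selected
-- ===== Notes on version B (the rewrite author's own statement) =====
-- stated objective: alternative
-- what changed: Instead of grouping all rows per symbol and re-scanning each symbol's row list for an exact base_date match, B builds two flat dicts in one pass over supply_rows (first row seen per symbol, first exact-date row per symbol) and then answers each requested symbol by two direct lookups with an or-chain.
import Mathlib
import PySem

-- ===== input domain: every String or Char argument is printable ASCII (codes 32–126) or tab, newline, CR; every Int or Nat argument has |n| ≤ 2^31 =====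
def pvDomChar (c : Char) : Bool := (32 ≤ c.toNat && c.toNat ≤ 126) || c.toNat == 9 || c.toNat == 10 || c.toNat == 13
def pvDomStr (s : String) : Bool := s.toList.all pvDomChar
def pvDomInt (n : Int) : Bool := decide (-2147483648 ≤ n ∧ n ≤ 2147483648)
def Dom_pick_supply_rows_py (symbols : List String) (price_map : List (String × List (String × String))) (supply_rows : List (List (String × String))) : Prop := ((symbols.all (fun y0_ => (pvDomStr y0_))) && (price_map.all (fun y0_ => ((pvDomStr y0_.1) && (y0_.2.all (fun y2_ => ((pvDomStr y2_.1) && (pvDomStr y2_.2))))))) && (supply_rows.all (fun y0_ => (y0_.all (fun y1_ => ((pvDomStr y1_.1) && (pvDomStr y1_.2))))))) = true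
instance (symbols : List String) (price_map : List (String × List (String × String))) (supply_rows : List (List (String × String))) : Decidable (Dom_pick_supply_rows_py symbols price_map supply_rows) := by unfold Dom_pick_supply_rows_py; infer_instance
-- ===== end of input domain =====

-- B replaces A's group-by-symbol dict plus per-symbol inner scan with two flat
-- first-seen dicts built in one pass and an or-chain of direct lookups (alternative).

-- ===== PORT A =====
-- shared primitive: row.get(k) / dict lookup (first match)
def pvRGet (row : List (String × String)) (k : String) : Option String :=
  (PySem.Dict.mk row).get? k

-- (price_map.get(symbol) or {}).get("base_date")
def pvPriceDate (price_map : List (String × List (String × String))) (sym : String) : Option String :=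
  pvRGet (match (PySem.Dict.mk price_map).get? sym with
          | some m => if m.isEmpty then [] else m
          | none => []) "base_date"

-- 'price_date and row.get("base_date") == price_date'
def pvPred (price_map : List (String × List (String × String))) (sym : String) (row : List (String × String)) : Bool :=
  (match pvPriceDate price_map sym with
   | some s => decide (s ≠ "")
   | none => false) && (pvRGet row "base_date" == pvPriceDate price_map sym)

-- A's first loop body: defaultdict(list) append, skipping falsy symbols
def pvAStep (d : PySem.Dict String (List (List (String × String)))) (row : List (String × String)) : PySem.Dict String (List (List (String × String))) :=
  match pvRGet row "symbol" with
  | some sym => if sym = "" then d else d.modify sym [] (· ++ [row])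
  | none => d

def pick_supply_rows_py (symbols : List String) (price_map : List (String × List (String × String))) (supply_rows : List (List (String × String))) : List (String × List (String × String)) :=
  let rbs := supply_rows.foldl pvAStep PySem.Dict.empty
  (symbols.foldl (fun sel sym =>
    match rbs.getD sym [] with
    | [] => sel.insert sym []
    | r0 :: rest =>
      match (r0 :: rest).find? (pvPred price_map sym) with
      | some r => sel.insert sym (if r.isEmpty then r0 else r)   -- 'exact_date_row or rows[0]'
      | none => sel.insert sym r0) PySem.Dict.empty).items

-- ===== PORT B =====
-- 'x or y' on a row lookup (None and {} are falsy)
def pvOrRow (o : Option (List (String × String))) (y : List (String × String)) : List (String × String) :=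
  match o with
  | some r => if r.isEmpty then y else r
  | none => y

-- B's single pass: maintain (first_by_symbol, exact_by_symbol)
def pvBStep (price_map : List (String × List (String × String))) (fe : PySem.Dict String (List (String × String)) × PySem.Dict String (List (String × String))) (row : List (String × String)) : PySem.Dict String (List (String × String)) × PySem.Dict String (List (String × String)) :=
  match pvRGet row "symbol" with
  | some sym =>
    if sym = "" then fe
    else
      ((if fe.1.contains sym then fe.1 else fe.1.insert sym row),
       (if fe.2.contains sym then fe.2
        else if pvPred price_map sym row then fe.2.insert sym row else fe.2))
  | none => fe

def pick_supply_rows_py_alt (symbols : List String) (price_map : List (String × List (String × String))) (supply_rows : List (List (String × String))) : List (String × List (String × String)) :=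
  let fe := supply_rows.foldl (pvBStep price_map) (PySem.Dict.empty, PySem.Dict.empty)
  (symbols.foldl (fun sel sym =>
    sel.insert sym (pvOrRow (fe.2.get? sym) (pvOrRow (fe.1.get? sym) []))) PySem.Dict.empty).items

-- ===== PRECONDITION & SPEC =====
def Spec_pick_supply_rows_py (symbols : List String) (price_map : List (String × List (String × String))) (supply_rows : List (List (String × String))) (out : List (String × List (String × String))) : Prop := out = pick_supply_rows_py_alt symbols price_map supply_rows
instance (symbols : List String) (price_map : List (String × List (String × String))) (supply_rows : List (List (String × String))) (out : List (String × List (String × String))) : Decidable (Spec_pick_supply_rows_py symbols price_map supply_rows out) := by unfold Spec_pick_supply_rows_py; infer_instance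

-- ===== CLAIM (what is proved, stated in full; the proofs are below) =====
def Claim_equal_pick_supply_rows_py : Prop := ∀ (symbols : List String) (price_map : List (String × List (String × String))) (supply_rows : List (List (String × String))), Dom_pick_supply_rows_py symbols price_map supply_rows → Spec_pick_supply_rows_py symbols price_map supply_rows (pick_supply_rows_py symbols price_map supply_rows)

-- ===== LEMMAS AND PROOFS =====

-- Invariant tying B's two dicts to A's grouped dict
def pvInv (price_map : List (String × List (String × String))) (rbs : PySem.Dict String (List (List (String × String)))) (fe : PySem.Dict String (List (String × String)) × PySem.Dict String (List (String × String))) : Prop :=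
  ∀ sym, fe.1.get? sym = (rbs.getD sym []).head? ∧
         fe.2.get? sym = (rbs.getD sym []).find? (pvPred price_map sym)

lemma pvInv_empty (price_map : List (String × List (String × String))) :
    pvInv price_map PySem.Dict.empty (PySem.Dict.empty, PySem.Dict.empty) := by
  intro sym
  simp [PySem.Dict.get?_empty]

lemma pvInv_step (price_map : List (String × List (String × String))) (rbs : PySem.Dict String (List (List (String × String)))) (fe : PySem.Dict String (List (String × String)) × PySem.Dict String (List (String × String))) (row : List (String × String)) (h : pvInv price_map rbs fe) :
    pvInv price_map (pvAStep rbs row) (pvBStep price_map fe row) := by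
  obtain ⟨f, e⟩ := fe
  unfold pvAStep pvBStep
  cases hg : pvRGet row "symbol" with
  | none => exact h
  | some sym =>
    by_cases hs : sym = ""
    · simpa [hs] using h
    · simp only [if_neg hs]
      intro k
      obtain ⟨h1, h2⟩ := h k
      dsimp only at h1 h2 ⊢
      by_cases hk : k = sym
      · subst hk
        have hrbs : ((rbs.modify k [] (· ++ [row])).getD k []) = rbs.getD k [] ++ [row] :=
          PySem.Dict.getD_modify_self rbs k [] _
        constructor
        · rw [hrbs, PySem.Dict.contains_eq_isSome_get?, h1]
          cases hl : rbs.getD k [] with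
          | nil => simp [hl] at h1; simp [PySem.Dict.get?_insert_self]
          | cons a l =>
            rw [hl] at h1
            simp at h1 ⊢
            exact h1
        · rw [hrbs, List.find?_append, PySem.Dict.contains_eq_isSome_get?, h2]
          cases hf : List.find? (pvPred price_map k) (rbs.getD k []) with
          | some r => simp [hf, h2]
          | none =>
            by_cases hp : pvPred price_map k row = true
            · simp [hp, PySem.Dict.get?_insert_self, List.find?]
            · simp [hf, hp, h2, List.find?]
      · have hrbs : ((rbs.modify sym [] (· ++ [row])).getD k []) = rbs.getD k [] := by
          rw [PySem.Dict.getD_modify]; simp [hk]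
        constructor
        · rw [hrbs]
          split
          · exact h1
          · rw [PySem.Dict.get?_insert_of_ne f row hk]; exact h1
        · rw [hrbs]
          split
          · exact h2
          · split
            · rw [PySem.Dict.get?_insert_of_ne e row hk]; exact h2
            · exact h2

lemma pvInv_fold (price_map : List (String × List (String × String))) (rows : List (List (String × String))) (rbs : PySem.Dict String (List (List (String × String)))) (fe : PySem.Dict String (List (String × String)) × PySem.Dict String (List (String × String))) (h : pvInv price_map rbs fe) :
    pvInv price_map (rows.foldl pvAStep rbs) (rows.foldl (pvBStep price_map) fe) := by
  induction rows generalizing rbs fe with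
  | nil => exact h
  | cons r rs ih => exact ih _ _ (pvInv_step price_map rbs fe r h)

-- per-symbol values agree
lemma pvValue_eq (price_map : List (String × List (String × String))) (sym : String) (rbs : PySem.Dict String (List (List (String × String)))) (fe : PySem.Dict String (List (String × String)) × PySem.Dict String (List (String × String))) (h : pvInv price_map rbs fe) :
    (match rbs.getD sym [] with
     | [] => ([] : List (String × String))
     | r0 :: rest =>
       match (r0 :: rest).find? (pvPred price_map sym) with
       | some r => if r.isEmpty then r0 else r
       | none => r0)
    = pvOrRow (fe.2.get? sym) (pvOrRow (fe.1.get? sym) []) := by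
  obtain ⟨h1, h2⟩ := h sym
  rw [h1, h2]
  cases hl : rbs.getD sym [] with
  | nil => simp [pvOrRow]
  | cons r0 rest =>
    simp only [List.head?_cons]
    cases hf : (r0 :: rest).find? (pvPred price_map sym) with
    | none =>
      cases r0 <;> simp [pvOrRow]
    | some r =>
      by_cases hr : r = []
      · subst hr; cases r0 <;> simp [pvOrRow]
      · simp [pvOrRow, hr, List.isEmpty_iff]

lemma pvSel_fold (price_map : List (String × List (String × String))) (rbs : PySem.Dict String (List (List (String × String)))) (fe : PySem.Dict String (List (String × String)) × PySem.Dict String (List (String × String))) (h : pvInv price_map rbs fe) (symbols : List String) (sel : PySem.Dict String (List (String × String))) :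
    symbols.foldl (fun sel sym =>
      match rbs.getD sym [] with
      | [] => sel.insert sym []
      | r0 :: rest =>
        match (r0 :: rest).find? (pvPred price_map sym) with
        | some r => sel.insert sym (if r.isEmpty then r0 else r)
        | none => sel.insert sym r0) sel
    = symbols.foldl (fun sel sym =>
        sel.insert sym (pvOrRow (fe.2.get? sym) (pvOrRow (fe.1.get? sym) []))) sel := by
  have hstep : ∀ (sel : PySem.Dict String (List (String × String))) (sym : String),
      (match rbs.getD sym [] with
       | [] => sel.insert sym []
       | r0 :: rest =>
         match (r0 :: rest).find? (pvPred price_map sym) with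
         | some r => sel.insert sym (if r.isEmpty then r0 else r)
         | none => sel.insert sym r0)
      = sel.insert sym (pvOrRow (fe.2.get? sym) (pvOrRow (fe.1.get? sym) [])) := by
    intro sel sym
    rw [← pvValue_eq price_map sym rbs fe h]
    cases rbs.getD sym [] with
    | nil => rfl
    | cons r0 rest =>
      cases hf : (r0 :: rest).find? (pvPred price_map sym) <;> simp only [hf]
  simp only [hstep]

-- ===== VERDICT (by name: the statement is the Claim_ definition above) =====
theorem pick_supply_rows_py_spec : Claim_equal_pick_supply_rows_py := by
  intro symbols price_map supply_rows _
  unfold Spec_pick_supply_rows_py pick_supply_rows_py pick_supply_rows_py_alt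
  exact congrArg PySem.Dict.items
    (pvSel_fold price_map _ _
      (pvInv_fold price_map supply_rows PySem.Dict.empty (PySem.Dict.empty, PySem.Dict.empty)
        (pvInv_empty price_map)) symbols PySem.Dict.empty)
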